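-- pv_equiv track=rewrite | github.com/fugue-project/fugue-warehouses | fugue_snowflake/_utils.py | parse_table_name
-- ===== SOURCE A (Python) =====
-- from typing import Any, Dict, Iterable, List, Optional, Set
--
-- def normalize_name(name: str) -> str:
--     if name.startswith('"') and name.endswith('"'):
--         return name
--     return name.upper()
--
-- def parse_table_name(name: str, normalize: bool = False) -> List[str]:
--     res: List[str] = []
--     start, p = 0, 0
--     while p < len(name):
--         if name[p] == '"':
--             p += 1
--             while p < len(name):
--                 if name[p] == '"':
--                     if p + 1 < len(name) and name[p + 1] == '"':
--                         p += 1
--                     else: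
--                         break
--                 p += 1
--             p += 1
--         elif name[p] == ".":
--             res.append(name[start:p])
--             start = p + 1
--             p += 1
--         else:
--             p += 1
--     if start < len(name):
--         res.append(name[start:])
--     if normalize:
--         return [normalize_name(x) for x in res]
--     return res
-- ===== SOURCE B (Python) =====
-- from typing import List
--
-- def parse_table_name(name: str, normalize: bool = False) -> List[str]:
--     # A dot is a top-level separator iff the number of '"' characters before it
--     # is even (doubled "" escapes contribute 2, so they never change parity).
--     # So: one fold over the characters with a running quote count; no quote
--     # state machine, no escape lookahead, no index arithmetic.
--     segs: List[str] = []
--     cur = ""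
--     quotes = 0
--     for c in name:
--         if c == '"':
--             quotes += 1
--         if c == "." and quotes % 2 == 0:
--             segs.append(cur)
--             cur = ""
--         else:
--             cur += c
--     if cur:
--         segs.append(cur)
--     if normalize:
--         return [s if s.startswith('"') and s.endswith('"') else s.upper() for s in segs]
--     return segs
-- ===== Notes on version B (the rewrite author's own statement) =====
-- stated objective: alternative
-- what changed: Replaces A's quote state machine (nested cursor loops with doubled-quote lookahead and index slicing) by the arithmetic observation that a dot is a separator iff the count of quote characters before it is even: one uniform fold over the characters with a running quote counter, no lookahead and no slicing.
import Mathlib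
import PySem

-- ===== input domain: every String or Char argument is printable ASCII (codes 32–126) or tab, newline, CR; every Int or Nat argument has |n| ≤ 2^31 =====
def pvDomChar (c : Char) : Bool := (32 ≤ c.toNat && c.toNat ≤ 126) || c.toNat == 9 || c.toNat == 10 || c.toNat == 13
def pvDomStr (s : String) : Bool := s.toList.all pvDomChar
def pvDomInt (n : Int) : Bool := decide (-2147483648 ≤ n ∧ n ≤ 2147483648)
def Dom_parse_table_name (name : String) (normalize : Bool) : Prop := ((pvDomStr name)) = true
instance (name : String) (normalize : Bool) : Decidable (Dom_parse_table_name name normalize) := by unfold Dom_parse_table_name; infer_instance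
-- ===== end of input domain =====

-- B replaces A's quote state machine by a quote-parity counter fold; same cost, different algorithm ("alternative").

-- ===== PORT A =====
-- inner while loop of A: scans a quoted region starting at p, returns the cursor at break / end
def pvInnerA (cs : List Char) (p : Nat) : Nat :=
  if p < cs.length then
    if cs.getD p ' ' = '"' then
      if p + 1 < cs.length ∧ cs.getD (p + 1) ' ' = '"' then pvInnerA cs (p + 2)
      else p
    else pvInnerA cs (p + 1)
  else p
termination_by cs.length - p

theorem le_pvInnerA (cs : List Char) (p : Nat) : p ≤ pvInnerA cs p := by
  unfold pvInnerA
  split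
  · split
    · split
      · exact le_trans (by omega) (le_pvInnerA cs (p + 2))
      · exact le_refl p
    · exact le_trans (by omega) (le_pvInnerA cs (p + 1))
  · exact le_refl p
termination_by cs.length - p

-- outer while loop of A (with the trailing 'if start < len' folded in at loop exit)
def pvOuterA (cs : List Char) (start p : Nat) (res : List (List Char)) : List (List Char) :=
  if p < cs.length then
    if cs.getD p ' ' = '"' then pvOuterA cs start (pvInnerA cs (p + 1) + 1) res
    else if cs.getD p ' ' = '.' then
      pvOuterA cs (p + 1) (p + 1) (res ++ [PySem.List.slice cs (some (start : Int)) (some (p : Int))])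
    else pvOuterA cs start (p + 1) res
  else if start < cs.length then res ++ [PySem.List.slice cs (some (start : Int)) none] else res
termination_by cs.length - p
decreasing_by
  · have := le_pvInnerA cs (p + 1); omega
  · omega
  · omega

-- module helper normalize_name
def pvNormalizeName (cs : List Char) : List Char :=
  if PySem.Chars.startswith cs ['"'] ∧ PySem.Chars.endswith cs ['"'] then cs
  else PySem.Chars.upper cs

def parse_table_name (name : String) (normalize : Bool) : List String :=
  let res := pvOuterA name.toList 0 0 []
  if normalize then res.map (fun s => String.ofList (pvNormalizeName s))
  else res.map String.ofList

-- ===== PORT B =====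
-- one step of B's for-loop: state = (segs, cur, quotes)
def pvStepB (st : List (List Char) × List Char × Nat) (c : Char) :
    List (List Char) × List Char × Nat :=
  let q := if c = '"' then st.2.2 + 1 else st.2.2
  if c = '.' ∧ q % 2 = 0 then (st.1 ++ [st.2.1], [], q)
  else (st.1, st.2.1 ++ [c], q)

def pvNormB (cs : List Char) : List Char :=
  if PySem.Chars.startswith cs ['"'] ∧ PySem.Chars.endswith cs ['"'] then cs
  else PySem.Chars.upper cs

def parse_table_name_alt (name : String) (normalize : Bool) : List String :=
  let st := name.toList.foldl pvStepB ([], [], 0)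
  let segs := if st.2.1 ≠ [] then st.1 ++ [st.2.1] else st.1
  if normalize then segs.map (fun s => String.ofList (pvNormB s))
  else segs.map String.ofList

-- ===== PRECONDITION & SPEC =====
def Spec_parse_table_name (name : String) (normalize : Bool) (out : List String) : Prop := out = parse_table_name_alt name normalize
instance (name : String) (normalize : Bool) (out : List String) : Decidable (Spec_parse_table_name name normalize out) := by unfold Spec_parse_table_name; infer_instance

-- ===== CLAIM =====
def Claim_equal_parse_table_name : Prop := ∀ (name : String) (normalize : Bool), Dom_parse_table_name name normalize → Spec_parse_table_name name normalize (parse_table_name name normalize)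

-- ===== LEMMAS AND PROOFS =====

-- proof-side abbreviations
def pvSl (cs : List Char) (a b : Nat) : List Char := (cs.drop a).take (b - a)
def pvQC (cs : List Char) (p : Nat) : Nat := ((cs.take p).filter (· = '"')).length
def pvFin (st : List (List Char) × List Char × Nat) : List (List Char) :=
  if st.2.1 ≠ [] then st.1 ++ [st.2.1] else st.1

theorem pvGetD_eq (cs : List Char) (p : Nat) (h : p < cs.length) :
    cs.getD p ' ' = cs[p] := by
  simp [List.getD_eq_getElem?_getD, List.getElem?_eq_getElem h]

theorem pvQC_succ (cs : List Char) (p : Nat) (h : p < cs.length) :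
    pvQC cs (p + 1) = pvQC cs p + (if cs.getD p ' ' = '"' then 1 else 0) := by
  unfold pvQC
  rw [List.take_add_one, List.getElem?_eq_getElem h, pvGetD_eq cs p h, List.filter_append]
  by_cases hc : cs[p] = '"' <;> simp [hc]

theorem pvSl_succ (cs : List Char) (a p : Nat) (ha : a ≤ p) (h : p < cs.length) :
    pvSl cs a p ++ [cs.getD p ' '] = pvSl cs a (p + 1) := by
  unfold pvSl
  have hp : p - a < (cs.drop a).length := by simp; omega
  rw [pvGetD_eq cs p h, show p + 1 - a = (p - a) + 1 by omega, List.take_add_one,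
      List.getElem?_eq_getElem hp]
  simp [List.getElem_drop, show a + (p - a) = p by omega]

theorem pvDrop_succ (cs : List Char) (p : Nat) (h : p < cs.length) :
    cs.drop p = cs.getD p ' ' :: cs.drop (p + 1) := by
  rw [List.drop_eq_getElem_cons h]
  rw [pvGetD_eq cs p h]

-- one non-splitting step of B's fold, expressed on position p's invariant state
theorem pvStepB_keep (cs : List Char) (p start : Nat) (res : List (List Char))
    (h : p < cs.length) (hsp : start ≤ p)
    (hnot : ¬(cs.getD p ' ' = '.' ∧ pvQC cs (p + 1) % 2 = 0)) :
    pvStepB (res, pvSl cs start p, pvQC cs p) (cs.getD p ' ')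
      = (res, pvSl cs start (p + 1), pvQC cs (p + 1)) := by
  have hq' : (if cs.getD p ' ' = '"' then pvQC cs p + 1 else pvQC cs p) = pvQC cs (p + 1) := by
    rw [pvQC_succ cs p h]; split <;> omega
  simp only [pvStepB]
  rw [hq', if_neg hnot, pvSl_succ cs start p hsp h]

-- the splitting step of B's fold
theorem pvStepB_dot (cs : List Char) (p start : Nat) (res : List (List Char))
    (h : p < cs.length) (hdot : cs.getD p ' ' = '.') (hev : pvQC cs (p + 1) % 2 = 0) :
    pvStepB (res, pvSl cs start p, pvQC cs p) (cs.getD p ' ')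
      = (res ++ [pvSl cs start p], [], pvQC cs (p + 1)) := by
  have hq' : (if cs.getD p ' ' = '"' then pvQC cs p + 1 else pvQC cs p) = pvQC cs (p + 1) := by
    rw [pvQC_succ cs p h]; split <;> omega
  simp only [pvStepB]
  rw [hq', if_pos ⟨hdot, hev⟩]

-- the quoted region: B's fold with odd quote parity walks straight through A's inner loop
theorem pvInner_fold (cs : List Char) :
    ∀ p res start, start ≤ p → pvQC cs p % 2 = 1 →
      (cs.drop p).foldl pvStepB (res, pvSl cs start p, pvQC cs p)
        = (cs.drop (pvInnerA cs p + 1)).foldl pvStepB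
            (res, pvSl cs start (pvInnerA cs p + 1), pvQC cs (pvInnerA cs p + 1))
      ∧ (pvQC cs (pvInnerA cs p + 1) % 2 = 0 ∨ cs.length ≤ pvInnerA cs p) := by
  intro p
  induction hk : cs.length - p using Nat.strong_induction_on generalizing p with
  | _ k ih =>
  intro res start hsp hodd
  rw [pvInnerA]
  by_cases h : p < cs.length
  · rw [if_pos h]
    by_cases hq : cs.getD p ' ' = '"'
    · rw [if_pos hq]
      have hq1 : pvQC cs (p + 1) = pvQC cs p + 1 := by rw [pvQC_succ cs p h, if_pos hq]
      by_cases hd : p + 1 < cs.length ∧ cs.getD (p + 1) ' ' = '"'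
      · rw [if_pos hd]
        rw [pvDrop_succ cs p h, List.foldl_cons,
            pvStepB_keep cs p start res h hsp (by rw [hq]; simp),
            pvDrop_succ cs (p + 1) hd.1, List.foldl_cons,
            pvStepB_keep cs (p + 1) start res hd.1 (by omega) (by rw [hd.2]; simp)]
        have hodd2 : pvQC cs (p + 2) % 2 = 1 := by
          rw [show p + 2 = (p + 1) + 1 by rfl, pvQC_succ cs (p + 1) hd.1, if_pos hd.2, hq1]
          omega
        exact ih _ (by omega) _ rfl res start (by omega) hodd2
      · rw [if_neg hd]
        refine ⟨?_, Or.inl (by rw [hq1]; omega)⟩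
        rw [pvDrop_succ cs p h, List.foldl_cons,
            pvStepB_keep cs p start res h hsp (by rw [hq]; simp)]
    · rw [if_neg hq]
      have hq1 : pvQC cs (p + 1) = pvQC cs p := by rw [pvQC_succ cs p h, if_neg hq]; omega
      rw [pvDrop_succ cs p h, List.foldl_cons,
          pvStepB_keep cs p start res h hsp (by rw [hq1]; intro hc; omega)]
      exact ih _ (by omega) _ rfl res start (by omega) (by omega)
  · rw [if_neg h]
    refine ⟨?_, Or.inr (by omega)⟩
    have h1 : cs.drop p = [] := List.drop_eq_nil_of_le (by omega)
    have h2 : cs.drop (p + 1) = [] := List.drop_eq_nil_of_le (by omega)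
    have h3 : pvSl cs start (p + 1) = pvSl cs start p := by
      unfold pvSl
      rw [List.take_of_length_le (by simp; omega), List.take_of_length_le (by simp; omega)]
    have h4 : pvQC cs (p + 1) = pvQC cs p := by
      unfold pvQC
      rw [List.take_of_length_le (by omega), List.take_of_length_le (by omega)]
    rw [h1, h2, h3, h4]

-- main invariant: A's cursor loop equals B's fold, finished
theorem pvOuter_fold (cs : List Char) :
    ∀ p start res, start ≤ p → (pvQC cs p % 2 = 0 ∨ cs.length ≤ p) →
      pvOuterA cs start p res
        = pvFin ((cs.drop p).foldl pvStepB (res, pvSl cs start p, pvQC cs p)) := by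
  intro p
  induction hk : cs.length - p using Nat.strong_induction_on generalizing p with
  | _ k ih =>
  intro start res hsp hev
  rw [pvOuterA]
  by_cases h : p < cs.length
  · rw [if_pos h]
    have heven : pvQC cs p % 2 = 0 := by omega
    by_cases hq : cs.getD p ' ' = '"'
    · rw [if_pos hq]
      have hq1 : pvQC cs (p + 1) = pvQC cs p + 1 := by rw [pvQC_succ cs p h, if_pos hq]
      rw [pvDrop_succ cs p h, List.foldl_cons,
          pvStepB_keep cs p start res h hsp (by rw [hq]; simp)]
      obtain ⟨hfold, hpar⟩ := pvInner_fold cs (p + 1) res start (by omega) (by omega)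
      rw [hfold]
      have hle := le_pvInnerA cs (p + 1)
      rcases hpar with hp0 | hp1
      · exact ih _ (by omega) _ rfl start res (by omega) (Or.inl hp0)
      · exact ih _ (by omega) _ rfl start res (by omega) (Or.inr (by omega))
    · rw [if_neg hq]
      have hq1 : pvQC cs (p + 1) = pvQC cs p := by rw [pvQC_succ cs p h, if_neg hq]; omega
      by_cases hd : cs.getD p ' ' = '.'
      · rw [if_pos hd]
        rw [pvDrop_succ cs p h, List.foldl_cons,
            pvStepB_dot cs p start res h hd (by omega)]
        have hsl : PySem.List.slice cs (some (start : Int)) (some (p : Int)) = pvSl cs start p := by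
          rw [PySem.List.slice_natCast]; rfl
        have hnil : ([] : List Char) = pvSl cs (p + 1) (p + 1) := by unfold pvSl; simp
        rw [hsl, hnil,
            ih _ (by omega) _ rfl (p + 1) (res ++ [pvSl cs start p]) (le_refl _) (Or.inl (by omega))]
      · rw [if_neg hd]
        rw [pvDrop_succ cs p h, List.foldl_cons,
            pvStepB_keep cs p start res h hsp (by intro hc; exact hd hc.1)]
        exact ih _ (by omega) _ rfl start res (by omega) (Or.inl (by omega))
  · rw [if_neg h]
    have h1 : cs.drop p = [] := List.drop_eq_nil_of_le (by omega)
    rw [h1, List.foldl_nil]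
    unfold pvFin
    have h2 : pvSl cs start p = cs.drop start := by
      unfold pvSl; rw [List.take_of_length_le (by simp; omega)]
    rw [h2]
    have h3 : PySem.List.slice cs (some (start : Int)) none = cs.drop start :=
      PySem.List.slice_from_natCast cs start
    by_cases hs : start < cs.length
    · rw [if_pos hs, if_pos (by simp [List.drop_eq_nil_iff]; omega), h3]
    · rw [if_neg hs, if_neg (by simp [List.drop_eq_nil_iff]; omega)]

-- ===== VERDICT =====
theorem parse_table_name_spec : Claim_equal_parse_table_name := by
  intro name normalize _
  unfold Spec_parse_table_name parse_table_name parse_table_name_alt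
  have h := pvOuter_fold name.toList 0 0 [] (le_refl 0) (Or.inl (by unfold pvQC; simp))
  have hsl : pvSl name.toList 0 0 = [] := by unfold pvSl; simp
  have hqc : pvQC name.toList 0 = 0 := by unfold pvQC; simp
  rw [hsl, hqc, List.drop_zero] at h
  rw [h]
  unfold pvFin
  simp [pvNormalizeName, pvNormB]
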